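-- pv_equiv track=rewrite | github.com/timelordy/UniTools-EOM | EOMTemplateTools.extension/lib/unibim/knk_split_utils.py | split_by_flag
-- ===== SOURCE A (Python) =====
-- def split_by_flag(circuits, flag_map):
--     eo = []
--     em = []
--     es = []
--     for circuit in circuits:
--         flag = flag_map.get(circuit)
--         if flag is None:
--             es.append(circuit)
--         elif flag:
--             eo.append(circuit)
--         else:
--             em.append(circuit)
--     return sorted(set(eo)), sorted(set(em)), sorted(set(es))
-- ===== SOURCE B (Python) =====
-- def split_by_flag(circuits, flag_map):
--     eo = sorted(set(c for c in circuits if flag_map.get(c)))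
--     em = sorted(set(c for c in circuits
--                     if flag_map.get(c) is not None and not flag_map.get(c)))
--     es = sorted(set(c for c in circuits if flag_map.get(c) is None))
--     return eo, em, es
-- ===== Notes on version B (the rewrite author's own statement) =====
-- stated objective: simpler
-- what changed: Replaces the single three-branch partition loop with three accumulators by three independent filtering passes, each a one-line sorted(set(comprehension)) over circuits.
import Mathlib
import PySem

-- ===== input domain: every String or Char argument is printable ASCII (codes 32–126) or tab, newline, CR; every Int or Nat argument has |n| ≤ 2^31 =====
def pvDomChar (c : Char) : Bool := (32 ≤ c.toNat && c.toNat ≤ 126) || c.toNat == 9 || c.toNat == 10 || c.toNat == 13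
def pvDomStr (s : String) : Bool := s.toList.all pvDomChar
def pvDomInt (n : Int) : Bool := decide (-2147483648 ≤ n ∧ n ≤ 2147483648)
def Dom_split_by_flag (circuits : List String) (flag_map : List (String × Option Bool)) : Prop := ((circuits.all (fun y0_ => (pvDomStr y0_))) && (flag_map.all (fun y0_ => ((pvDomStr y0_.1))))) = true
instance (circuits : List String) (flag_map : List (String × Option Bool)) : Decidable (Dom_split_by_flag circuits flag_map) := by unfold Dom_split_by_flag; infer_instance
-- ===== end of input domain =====

-- B replaces A's single three-branch partition loop by three independent filtering passes (simpler decomposition, same cost).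

-- flag_map.get(circuit): None both when the key is absent and when the stored value is None (shared by both ports)
def pvGetFlag (flag_map : List (String × Option Bool)) (c : String) : Option Bool :=
  ((PySem.Dict.mk flag_map).get? c).join

-- ===== PORT A =====
def split_by_flag (circuits : List String) (flag_map : List (String × Option Bool)) : List String × List String × List String :=
  let st := circuits.foldl (fun (s : List String × List String × List String) circuit =>
    match pvGetFlag flag_map circuit with
    | none       => (s.1, s.2.1, s.2.2 ++ [circuit])   -- flag is None: es.append
    | some true  => (s.1 ++ [circuit], s.2.1, s.2.2)   -- elif flag: eo.append
    | some false => (s.1, s.2.1 ++ [circuit], s.2.2))  -- else: em.append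
    ([], [], [])
  (PySem.List.sorted (PySem.Set.ofList st.1) (fun x => x) false,
   PySem.List.sorted (PySem.Set.ofList st.2.1) (fun x => x) false,
   PySem.List.sorted (PySem.Set.ofList st.2.2) (fun x => x) false)

-- ===== PORT B =====
def split_by_flag_alt (circuits : List String) (flag_map : List (String × Option Bool)) : List String × List String × List String :=
  (PySem.List.sorted (PySem.Set.ofList (circuits.filter (fun c => pvGetFlag flag_map c == some true))) (fun x => x) false,
   PySem.List.sorted (PySem.Set.ofList (circuits.filter (fun c => pvGetFlag flag_map c == some false))) (fun x => x) false,
   PySem.List.sorted (PySem.Set.ofList (circuits.filter (fun c => pvGetFlag flag_map c == none))) (fun x => x) false)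

-- ===== PRECONDITION & SPEC =====
def Spec_split_by_flag (circuits : List String) (flag_map : List (String × Option Bool)) (out : List String × List String × List String) : Prop := out = split_by_flag_alt circuits flag_map
instance (circuits : List String) (flag_map : List (String × Option Bool)) (out : List String × List String × List String) : Decidable (Spec_split_by_flag circuits flag_map out) := by unfold Spec_split_by_flag; infer_instance

-- ===== CLAIM (what is proved, stated in full; the proofs are below) =====
def Claim_equal_split_by_flag : Prop := ∀ (circuits : List String) (flag_map : List (String × Option Bool)), Dom_split_by_flag circuits flag_map → Spec_split_by_flag circuits flag_map (split_by_flag circuits flag_map)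

-- ===== LEMMAS AND PROOFS =====

-- A's partition loop computes exactly the three filters B takes directly.
theorem pv_foldl_partition (flag_map : List (String × Option Bool)) :
    ∀ (circuits : List String) (s : List String × List String × List String),
    circuits.foldl (fun (s : List String × List String × List String) circuit =>
      match pvGetFlag flag_map circuit with
      | none       => (s.1, s.2.1, s.2.2 ++ [circuit])
      | some true  => (s.1 ++ [circuit], s.2.1, s.2.2)
      | some false => (s.1, s.2.1 ++ [circuit], s.2.2)) s
    = (s.1 ++ circuits.filter (fun c => pvGetFlag flag_map c == some true),
       s.2.1 ++ circuits.filter (fun c => pvGetFlag flag_map c == some false),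
       s.2.2 ++ circuits.filter (fun c => pvGetFlag flag_map c == none)) := by
  intro circuits
  induction circuits with
  | nil => intro s; simp
  | cons c cs ih =>
    intro s
    cases h : pvGetFlag flag_map c with
    | none => simp [List.foldl_cons, h, ih]
    | some b => cases b <;> simp [List.foldl_cons, h, ih]

-- ===== VERDICT (by name: the statement is the Claim_ definition above) =====
theorem split_by_flag_spec : Claim_equal_split_by_flag := by
  intro circuits flag_map _
  show _ = _
  simp [split_by_flag, split_by_flag_alt, pv_foldl_partition]
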